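-- pv_equiv track=rewrite | github.com/30leo03/AoC | 2023/day_2/main.py | possible_pull
-- ===== SOURCE A (Python) =====
-- RED_MAX = 12
--
-- GREEN_MAX = 13
--
-- BLUE_MAX = 14
--
-- def possible_pull(pull):
--     col_red = 0
--     col_gre = 0
--     col_blu = 0
--     for hand in pull:
--         if hand[1] == 'red':
--             col_red += hand[0]
--         elif hand[1] == 'green':
--             col_gre += hand[0]
--         elif hand[1] == 'blue':
--             col_blu += hand[0]
--     if col_red > RED_MAX or col_gre > GREEN_MAX or col_blu > BLUE_MAX:
--         return False
--     else:
--         return True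
-- ===== SOURCE B (Python) =====
-- RED_MAX = 12
-- GREEN_MAX = 13
-- BLUE_MAX = 14
--
-- def possible_pull(pull):
--     red = sum(h[0] for h in pull if h[1] == 'red')
--     gre = sum(h[0] for h in pull if h[1] == 'green')
--     blu = sum(h[0] for h in pull if h[1] == 'blue')
--     return red <= RED_MAX and gre <= GREEN_MAX and blu <= BLUE_MAX
-- ===== Notes on version B (the rewrite author's own statement) =====
-- stated objective: simpler
-- what changed: Replaces the single pass with a branching three-counter accumulator by three independent filtered sums (one per color) combined in a direct conjunction, removing the mutable state and the elif chain.
import Mathlib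
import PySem

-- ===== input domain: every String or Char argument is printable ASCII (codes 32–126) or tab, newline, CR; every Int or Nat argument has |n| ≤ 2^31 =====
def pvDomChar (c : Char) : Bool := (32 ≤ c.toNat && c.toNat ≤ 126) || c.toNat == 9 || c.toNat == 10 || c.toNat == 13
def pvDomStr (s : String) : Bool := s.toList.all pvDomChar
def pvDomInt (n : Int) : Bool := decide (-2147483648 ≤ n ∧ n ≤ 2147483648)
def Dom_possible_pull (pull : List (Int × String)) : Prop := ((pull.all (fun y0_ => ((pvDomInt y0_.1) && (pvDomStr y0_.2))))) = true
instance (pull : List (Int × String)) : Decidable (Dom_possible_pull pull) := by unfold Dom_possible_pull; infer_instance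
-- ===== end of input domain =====

-- B replaces A's single branching accumulation pass by three independent filtered sums (objective: simpler).

-- ===== PORT A =====
-- A: one pass over pull maintaining three counters via an elif chain, then a threshold test.
def possible_pull (pull : List (Int × String)) : Bool :=
  let st := pull.foldl (fun (acc : Int × Int × Int) hand =>
    if hand.2 == "red" then (acc.1 + hand.1, acc.2.1, acc.2.2)
    else if hand.2 == "green" then (acc.1, acc.2.1 + hand.1, acc.2.2)
    else if hand.2 == "blue" then (acc.1, acc.2.1, acc.2.2 + hand.1)
    else acc) (0, 0, 0)
  if st.1 > 12 || st.2.1 > 13 || st.2.2 > 14 then false else true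

-- ===== PORT B =====
-- B: three independent filtered sums, one per color.
def pvColorSum (pull : List (Int × String)) (c : String) : Int :=
  ((pull.filter (fun h => h.2 == c)).map (fun h => h.1)).sum

def possible_pull_alt (pull : List (Int × String)) : Bool :=
  pvColorSum pull "red" ≤ 12 && pvColorSum pull "green" ≤ 13 && pvColorSum pull "blue" ≤ 14

-- ===== PRECONDITION & SPEC =====
def Spec_possible_pull (pull : List (Int × String)) (out : Bool) : Prop := out = possible_pull_alt pull
instance (pull : List (Int × String)) (out : Bool) : Decidable (Spec_possible_pull pull out) := by unfold Spec_possible_pull; infer_instance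

-- ===== CLAIM (what is proved, stated in full; the proofs are below) =====
def Claim_equal_possible_pull : Prop := ∀ (pull : List (Int × String)), Dom_possible_pull pull → Spec_possible_pull pull (possible_pull pull)

-- ===== LEMMAS AND PROOFS =====
theorem possible_pull_fold_eq (pull : List (Int × String)) (r g b : Int) :
    pull.foldl (fun (acc : Int × Int × Int) hand =>
      if hand.2 == "red" then (acc.1 + hand.1, acc.2.1, acc.2.2)
      else if hand.2 == "green" then (acc.1, acc.2.1 + hand.1, acc.2.2)
      else if hand.2 == "blue" then (acc.1, acc.2.1, acc.2.2 + hand.1)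
      else acc) (r, g, b)
    = (r + pvColorSum pull "red", g + pvColorSum pull "green", b + pvColorSum pull "blue") := by
  induction pull generalizing r g b with
  | nil => simp [pvColorSum]
  | cons h t ih =>
    rw [List.foldl_cons]
    by_cases hr : h.2 = "red"
    · have hr' : (h.2 == "red") = true := by simp [hr]
      have hg' : (h.2 == "green") = false := by simp [hr]
      have hb' : (h.2 == "blue") = false := by simp [hr]
      simp only [hr', hg', hb', if_true, if_false, Bool.false_eq_true, ite_false, ite_true]
      rw [ih]
      simp [pvColorSum, List.filter_cons, hr', hg', hb', Prod.ext_iff]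
      ring
    · by_cases hg : h.2 = "green"
      · have hr' : (h.2 == "red") = false := by simpa using hr
        have hg' : (h.2 == "green") = true := by simp [hg]
        have hb' : (h.2 == "blue") = false := by simp [hg]
        simp only [hr', hg', hb', Bool.false_eq_true, ite_false, ite_true]
        rw [ih]
        simp [pvColorSum, List.filter_cons, hr', hg', hb', Prod.ext_iff]
        ring
      · by_cases hb : h.2 = "blue"
        · have hr' : (h.2 == "red") = false := by simpa using hr
          have hg' : (h.2 == "green") = false := by simpa using hg
          have hb' : (h.2 == "blue") = true := by simp [hb]
          simp only [hr', hg', hb', Bool.false_eq_true, ite_false, ite_true]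
          rw [ih]
          simp [pvColorSum, List.filter_cons, hr', hg', hb', Prod.ext_iff]
          ring
        · have hr' : (h.2 == "red") = false := by simpa using hr
          have hg' : (h.2 == "green") = false := by simpa using hg
          have hb' : (h.2 == "blue") = false := by simpa using hb
          simp only [hr', hg', hb', Bool.false_eq_true, ite_false]
          rw [ih]
          simp [pvColorSum, List.filter_cons, hr', hg', hb']

-- ===== VERDICT (by name: the statement is the Claim_ definition above) =====
theorem possible_pull_spec : Claim_equal_possible_pull := by
  intro pull _
  unfold Spec_possible_pull possible_pull possible_pull_alt
  simp only [possible_pull_fold_eq, zero_add]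
  by_cases h1 : pvColorSum pull "red" ≤ 12 <;>
  by_cases h2 : pvColorSum pull "green" ≤ 13 <;>
  by_cases h3 : pvColorSum pull "blue" ≤ 14 <;>
  simp_all
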